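-- pv_equiv track=rewrite | github.com/Koonkie-Cloud-Services/circos_mag | circos_mag/seq_tk.py | N50_L50
-- ===== SOURCE A (Python) =====
-- from typing import Tuple, Dict
--
-- def N50_L50(seqs: Dict[str, str]) -> Tuple[int, int]:
--     """Calculate N50 and L50 for a set of sequences.
--
--      N50 is defined as the length of the longest
--      sequence, L, for which 50% of the total bases
--      are present in sequences of length >= L.
--
--      L50 is the smallest number of sequences required
--      to achieve N50.
--
--     Parameters
--     ----------
--     seqs : dict[seq_id] -> seq
--         Sequences indexed by sequence ids.
--
--     Returns
--     -------
--     int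
--         N50 for the set of sequences.
--     int
--         L50 for the set of sequences.
--     """
--
--     if not seqs:
--         raise ValueError('No sequences provided.')
--
--     seq_lens = [len(x) for x in seqs.values()]
--     threshold = sum(seq_lens) / 2.0
--
--     seq_lens.sort(reverse=True)
--
--     cur_sum = 0
--     L50 = 0
--     for seq_len in seq_lens:
--         cur_sum += seq_len
--         L50 += 1
--         if cur_sum >= threshold:
--             N50 = seq_len
--             break
--
--     return N50, L50
-- ===== SOURCE B (Python) =====
-- from typing import Tuple, Dict
-- from bisect import bisect_left
-- from itertools import accumulate
--
--
-- def N50_L50(seqs: Dict[str, str]) -> Tuple[int, int]: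
--     """N50/L50 via prefix sums and binary search instead of a linear scan."""
--     if not seqs:
--         raise ValueError('No sequences provided.')
--
--     seq_lens = sorted((len(s) for s in seqs.values()), reverse=True)
--     cumulative = list(accumulate(seq_lens))
--     # first index whose cumulative sum reaches half the total bases;
--     # (total + 1) // 2 is ceil(total/2): cum >= total/2.0  <=>  cum >= (total+1)//2 for ints
--     i = bisect_left(cumulative, (sum(seq_lens) + 1) // 2)
--     return seq_lens[i], i + 1
-- ===== Notes on version B (the rewrite author's own statement) =====
-- stated objective: alternative
-- what changed: Replaces A's linear break-out accumulation loop by building the prefix-sum list with itertools.accumulate and locating the half-total threshold with bisect_left (binary search), reading N50/L50 off the found index.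
import Mathlib
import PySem

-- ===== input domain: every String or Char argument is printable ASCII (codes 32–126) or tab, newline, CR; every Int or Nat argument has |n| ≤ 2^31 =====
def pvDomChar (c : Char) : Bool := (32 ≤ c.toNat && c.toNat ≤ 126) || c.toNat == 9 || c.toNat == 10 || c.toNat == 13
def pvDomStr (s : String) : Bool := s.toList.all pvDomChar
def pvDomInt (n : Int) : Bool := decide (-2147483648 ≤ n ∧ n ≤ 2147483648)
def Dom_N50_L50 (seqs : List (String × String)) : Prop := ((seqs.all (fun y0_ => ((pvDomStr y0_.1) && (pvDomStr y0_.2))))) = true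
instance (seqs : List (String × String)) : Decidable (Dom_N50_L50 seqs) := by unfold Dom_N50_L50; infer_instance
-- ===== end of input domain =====

-- B replaces A's linear break-out accumulation loop by a prefix-sum list plus a
-- bisect_left binary search (alternative decomposition, same results).


-- ===== PORT A =====
-- A's for-loop with break: cur_sum/L50 accumulate until cur_sum >= total/2.0.
-- The float comparison 'cur_sum >= total/2.0' is ported as the exact integer
-- comparison 'total <= 2*cur_sum' (equivalent for integers; total/2.0 is a
-- half-integer, exactly representable for the totals in the domain).
-- The [] case is Python's fall-through where N50 is unbound (NameError): under
-- Pre_ (non-empty dict) it is unreachable, since the full sum reaches total/2.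
def N50_L50_loop (total : Int) : List Int → Int → Int → Int × Int
  | [], _, L50 => (0, L50)
  | seqLen :: rest, curSum, L50 =>
      if total ≤ 2 * (curSum + seqLen) then (seqLen, L50 + 1)
      else N50_L50_loop total rest (curSum + seqLen) (L50 + 1)

def N50_L50 (seqs : List (String × String)) : Int × Int :=
  -- the ValueError on an empty dict is excluded by Pre_N50_L50
  let d := (PySem.Dict.mk ([] : List (String × String))).update seqs  -- dict(seqs)
  let seqLens0 := d.values.map PySem.Str.len
  let total := seqLens0.sum
  let seqLens := PySem.List.sorted seqLens0 (fun x => x) true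
  N50_L50_loop total seqLens 0 0

-- ===== PORT B =====
-- list(accumulate(seq_lens)) as a running-sum recursion
def pyAccumulate : List Int → Int → List Int
  | [], _ => []
  | x :: xs, acc => (acc + x) :: pyAccumulate xs (acc + x)

def N50_L50_alt (seqs : List (String × String)) : Int × Int :=
  -- the ValueError on an empty dict is excluded by Pre_N50_L50
  let d := (PySem.Dict.mk ([] : List (String × String))).update seqs  -- dict(seqs)
  let seqLens := PySem.List.sorted (d.values.map PySem.Str.len) (fun x => x) true
  let cumulative := pyAccumulate seqLens 0
  let i := PySem.List.bisectLeft cumulative (PySem.Int.floordiv (seqLens.sum + 1) 2)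
  -- seq_lens[i]: in range whenever the dict is non-empty; .getD 0 is the
  -- (unreachable under Pre_) IndexError case
  ((PySem.List.pyGet? seqLens (i : Int)).getD 0, (i : Int) + 1)

-- ===== PRECONDITION & SPEC =====
-- A raises ValueError exactly on the empty dict; Pre_ excludes only that input.
def Pre_N50_L50 (seqs : List (String × String)) : Prop := seqs ≠ []
instance (seqs : List (String × String)) : Decidable (Pre_N50_L50 seqs) := by unfold Pre_N50_L50; infer_instance

def pvWitness_N50_L50 : (List (String × String)) := [("c1", "ACGT"), ("c2", "AC")]

def Spec_N50_L50 (seqs : List (String × String)) (out : Int × Int) : Prop := out = N50_L50_alt seqs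
instance (seqs : List (String × String)) (out : Int × Int) : Decidable (Spec_N50_L50 seqs out) := by unfold Spec_N50_L50; infer_instance

-- ===== CLAIM (what is proved, stated in full; the proofs are below) =====
def Claim_equal_N50_L50 : Prop := ∀ (seqs : List (String × String)), Dom_N50_L50 seqs → Pre_N50_L50 seqs → Spec_N50_L50 seqs (N50_L50 seqs)

-- ===== LEMMAS AND PROOFS =====

-- the threshold predicate both programs test, as a Bool
def pvHit (total c : Int) : Bool := decide (total ≤ 2 * c)

-- ceil(total/2) ≤ c  ↔  total ≤ 2*c
theorem pvHit_iff_le_ceil (total c : Int) :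
    PySem.Int.floordiv (total + 1) 2 ≤ c ↔ total ≤ 2 * c := by
  constructor
  · intro h
    by_contra hc
    have h2 : c + 1 ≤ PySem.Int.floordiv (total + 1) 2 := by
      rw [PySem.Int.le_floordiv_iff_mul_le (by omega)]
      omega
    omega
  · intro h
    by_contra hc
    have h2 : c + 1 ≤ PySem.Int.floordiv (total + 1) 2 := by omega
    rw [PySem.Int.le_floordiv_iff_mul_le (by omega)] at h2
    omega

theorem pvAccumulate_length (xs : List Int) (acc : Int) :
    (pyAccumulate xs acc).length = xs.length := by
  induction xs generalizing acc with
  | nil => rfl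
  | cons x xs ih => simp [pyAccumulate, ih]

theorem pvAccumulate_le (xs : List Int) (acc : Int) (hnn : ∀ y ∈ xs, 0 ≤ y) :
    ∀ y ∈ pyAccumulate xs acc, acc ≤ y := by
  induction xs generalizing acc with
  | nil => simp [pyAccumulate]
  | cons x xs ih =>
      intro y hy
      have hx : 0 ≤ x := hnn x (by simp)
      rcases (by simpa [pyAccumulate] using hy : y = acc + x ∨ y ∈ pyAccumulate xs (acc + x)) with h | h
      · omega
      · have := ih (acc + x) (fun z hz => hnn z (by simp [hz])) y h
        omega

theorem pvAccumulate_pairwise (xs : List Int) (acc : Int) (hnn : ∀ y ∈ xs, 0 ≤ y) :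
    (pyAccumulate xs acc).Pairwise (· ≤ ·) := by
  induction xs generalizing acc with
  | nil => simp [pyAccumulate]
  | cons x xs ih =>
      simp only [pyAccumulate, List.pairwise_cons]
      exact ⟨pvAccumulate_le xs (acc + x) (fun z hz => hnn z (by simp [hz])),
             ih (acc + x) (fun z hz => hnn z (by simp [hz]))⟩

theorem pvAccumulate_sum_mem (xs : List Int) (acc : Int) (hne : xs ≠ []) :
    acc + xs.sum ∈ pyAccumulate xs acc := by
  induction xs generalizing acc with
  | nil => exact absurd rfl hne
  | cons x xs ih =>
      by_cases h : xs = []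
      · subst h; simp [pyAccumulate]
      · have := ih (acc + x) h
        simp only [pyAccumulate, List.sum_cons, List.mem_cons]
        right
        have heq : acc + (x + xs.sum) = acc + x + xs.sum := by ring
        rw [heq]
        exact this

-- A's loop computes the element and 1-based position of the FIRST prefix sum
-- reaching the threshold.
theorem pvLoop_eq_findIdx (total : Int) (xs : List Int) (acc c : Int)
    (hex : ∃ y ∈ pyAccumulate xs acc, pvHit total y = true) :
    N50_L50_loop total xs acc c =
      (xs.getD ((pyAccumulate xs acc).findIdx (pvHit total)) 0,
       c + ((pyAccumulate xs acc).findIdx (pvHit total)) + 1) := by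
  induction xs generalizing acc c with
  | nil => simp [pyAccumulate] at hex
  | cons x xs ih =>
      by_cases h : total ≤ 2 * (acc + x)
      · have hp : pvHit total (acc + x) = true := by simp [pvHit, h]
        simp [N50_L50_loop, h, pyAccumulate, List.findIdx_cons, hp]
      · have hp : pvHit total (acc + x) = false := by simp [pvHit, h]
        have hex' : ∃ y ∈ pyAccumulate xs (acc + x), pvHit total y = true := by
          rcases hex with ⟨y, hy, hpy⟩
          rcases (by simpa [pyAccumulate] using hy : y = acc + x ∨ y ∈ pyAccumulate xs (acc + x)) with h' | h'
          · rw [h'] at hpy; rw [hp] at hpy; cases hpy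
          · exact ⟨y, h', hpy⟩
        have := ih (acc + x) (c + 1) hex'
        simp only [N50_L50_loop, h, if_false, pyAccumulate, List.findIdx_cons, hp, cond_false]
        rw [this]
        simp only [Prod.mk.injEq, List.getD_cons_succ]
        exact ⟨trivial, by push_cast; ring⟩

-- bisect_left on a sorted list finds the first index whose element reaches x.
theorem pvBisect_eq_findIdx (cs : List Int) (x : Int)
    (hsorted : cs.Pairwise (· ≤ ·))
    (hex : ∃ y ∈ cs, decide (x ≤ y) = true) :
    PySem.List.bisectLeft cs x = cs.findIdx (fun y => decide (x ≤ y)) := by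
  obtain ⟨hle, hlt, hge⟩ := PySem.List.bisectLeft_spec cs x hsorted
  have hF : cs.findIdx (fun y => decide (x ≤ y)) < cs.length :=
    List.findIdx_lt_length_of_exists hex
  by_contra hne
  rcases Nat.lt_or_ge (PySem.List.bisectLeft cs x) (cs.findIdx (fun y => decide (x ≤ y))) with h | h
  · -- bisect < findIdx: element at bisect already satisfies, contradicting minimality
    have hi : PySem.List.bisectLeft cs x < cs.length := lt_trans h hF
    have h1 : x ≤ cs[PySem.List.bisectLeft cs x] := hge _ hi (le_refl _)
    have h2 := List.not_of_lt_findIdx h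
    simp only [decide_eq_false_iff_not] at h2
    exact h2 h1
  · -- findIdx < bisect: element at findIdx satisfies but bisect says it is < x
    have h' : cs.findIdx (fun y => decide (x ≤ y)) < PySem.List.bisectLeft cs x := by omega
    have h1 := hlt _ hF h'
    have h2 : (fun y => decide (x ≤ y)) cs[cs.findIdx (fun y => decide (x ≤ y))] = true :=
      List.findIdx_getElem (w := hF)
    simp at h2
    omega

theorem pvDict_values_nonempty (seqs : List (String × String)) (hne : seqs ≠ []) :
    ((PySem.Dict.mk ([] : List (String × String))).update seqs).values ≠ [] := by
  rcases seqs with _ | ⟨⟨k, v⟩, rest⟩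
  · exact absurd rfl hne
  · -- the dict after inserting the first pair is never empty, and insert/update
    -- never shrink the item list
    have key : ∀ (rest : List (String × String)) (d : PySem.Dict String String),
        d.items ≠ [] → (d.update rest).items ≠ [] := by
      intro rest
      induction rest with
      | nil => intro d h; exact h
      | cons p ps ih =>
          intro d h
          apply ih
          simp only [PySem.Dict.insert]
          split
          · simpa using h
          · simp
    have h0 : ((PySem.Dict.mk ([] : List (String × String))).insert k v).items ≠ [] := by
      simp [PySem.Dict.insert, PySem.Dict.contains]
    intro hcontra
    have : (((PySem.Dict.mk ([] : List (String × String))).update ((k, v) :: rest)).items) = [] := by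
      simpa [PySem.Dict.values] using hcontra
    exact key rest _ h0 (by simpa [PySem.Dict.update] using this)

-- ===== VERDICT (by name: the statement is the Claim_ definition above) =====
theorem N50_L50_spec : Claim_equal_N50_L50 := by
  intro seqs _hdom hpre
  unfold Spec_N50_L50
  simp only [N50_L50, N50_L50_alt]
  set d := (PySem.Dict.mk ([] : List (String × String))).update seqs with hd
  set lens0 := d.values.map PySem.Str.len with hlens0
  set lens := PySem.List.sorted lens0 (fun x => x) true with hlens
  -- shared facts
  have hperm : lens.Perm lens0 := PySem.List.sorted_perm lens0 (fun x => x) true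
  have hsum : lens.sum = lens0.sum := hperm.sum_eq
  have hnn : ∀ y ∈ lens, 0 ≤ y := by
    intro y hy
    have : y ∈ lens0 := (PySem.List.mem_sorted lens0 (fun x => x) true y).mp hy
    rcases List.mem_map.mp this with ⟨s, _, hs⟩
    rw [← hs]
    simp [PySem.Str.len]
  have hlne : lens ≠ [] := by
    intro h
    have hv := pvDict_values_nonempty seqs hpre
    have : lens0 = [] := by
      have := hperm
      rw [h] at this
      exact (List.Perm.nil_eq this).symm
    exact hv (by simpa [hlens0] using List.map_eq_nil_iff.mp this)
  set T := lens0.sum with hT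
  set cs := pyAccumulate lens 0 with hcs
  -- existence of a hit: the total itself reaches the threshold
  have hTnn : 0 ≤ T := by
    rw [← hsum]
    exact List.sum_nonneg hnn
  have hex : ∃ y ∈ cs, pvHit T y = true := by
    refine ⟨0 + lens.sum, pvAccumulate_sum_mem lens 0 hlne, ?_⟩
    simp only [pvHit, decide_eq_true_eq]
    omega
  -- findIdx with B's ceil-threshold predicate is findIdx with pvHit
  have hpred : (fun y => decide (PySem.Int.floordiv (lens.sum + 1) 2 ≤ y)) = pvHit T := by
    funext y
    simp only [pvHit, decide_eq_decide, hsum]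
    exact pvHit_iff_le_ceil T y
  have hexd : ∃ y ∈ cs, decide (PySem.Int.floordiv (lens.sum + 1) 2 ≤ y) = true := by
    rcases hex with ⟨y, hy, hp⟩
    exact ⟨y, hy, by rw [congrFun hpred y]; exact hp⟩
  have hbis : PySem.List.bisectLeft cs (PySem.Int.floordiv (lens.sum + 1) 2)
      = cs.findIdx (pvHit T) := by
    rw [pvBisect_eq_findIdx cs _ (pvAccumulate_pairwise lens 0 hnn) hexd, hpred]
  have hFlt : cs.findIdx (pvHit T) < lens.length := by
    have := List.findIdx_lt_length_of_exists hex
    rwa [hcs, pvAccumulate_length] at this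
  -- both sides
  rw [pvLoop_eq_findIdx T lens 0 0 hex, ← hcs, hbis,
      PySem.List.pyGet?_natCast lens (cs.findIdx (pvHit T))]
  simp only [Prod.mk.injEq]
  refine ⟨?_, by omega⟩
  simp [List.getD_eq_getElem?_getD]
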